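-- pv_equiv track=rewrite | github.com/Nori12/Projeto-Final | src/utils.py | get_avg_index_of_first_burst_of_ones
-- ===== SOURCE A (Python) =====
-- def get_avg_index_of_first_burst_of_ones(some_list):
--
--     start_idx = 0
--     start_idx_flg = False
--     end_idx = 0
--
--     for idx, item in enumerate(some_list):
--         if item == 1 and start_idx_flg is False:
--             start_idx = idx
--             end_idx = idx
--             start_idx_flg = True
--         elif item == 1 and start_idx_flg is True:
--             end_idx = idx
--         elif item == 0 and start_idx_flg is True:
--             break
--
--     avg_idx = start_idx + (end_idx - start_idx) // 2
--
--     return avg_idx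
-- ===== SOURCE B (Python) =====
-- def get_avg_index_of_first_burst_of_ones(some_list):
--     # Find the first 1; cut the tail at the first 0; locate the last 1 in that
--     # segment by searching its reversal. Non-0/non-1 values are simply part of
--     # the segment and never searched for, so they neither end nor extend it.
--     if 1 not in some_list:
--         return 0
--     start = some_list.index(1)
--     tail = some_list[start:]
--     stop = tail.index(0) if 0 in tail else len(tail)
--     seg = tail[:stop]
--     last = len(seg) - 1 - seg[::-1].index(1)
--     return start + last // 2
-- ===== Notes on version B (the rewrite author's own statement) =====
-- stated objective: alternative
-- what changed: Replaces the single flag-driven state-machine loop by whole-list operations: find the first 1 with index, cut the tail at the first 0 with a slice, and locate the last 1 of the segment by searching its reversal; the answer is start + last_offset // 2.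
import Mathlib
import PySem

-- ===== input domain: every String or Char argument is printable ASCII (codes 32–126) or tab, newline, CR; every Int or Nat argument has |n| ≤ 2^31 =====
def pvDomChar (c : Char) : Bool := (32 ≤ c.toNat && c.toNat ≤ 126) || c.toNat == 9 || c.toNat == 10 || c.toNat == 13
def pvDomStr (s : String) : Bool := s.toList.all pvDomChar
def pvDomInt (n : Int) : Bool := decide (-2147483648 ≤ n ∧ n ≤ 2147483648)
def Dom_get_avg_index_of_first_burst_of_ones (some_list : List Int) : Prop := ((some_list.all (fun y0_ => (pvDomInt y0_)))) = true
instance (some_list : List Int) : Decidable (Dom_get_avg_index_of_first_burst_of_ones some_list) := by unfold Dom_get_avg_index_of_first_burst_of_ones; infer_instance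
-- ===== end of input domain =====

-- B replaces A's flag-driven state-machine loop by index / slice-at-first-0 / reversed search for the last 1 (objective: alternative).

-- ===== PORT A =====
-- A's for-loop with its break: structural recursion over the list carrying (idx, start_idx, start_idx_flg, end_idx)
def pvLoopA : List Int → Int → Int → Bool → Int → Int × Int
  | [], _, s, _, e => (s, e)
  | x :: t, idx, s, flg, e =>
    if x = 1 ∧ flg = false then pvLoopA t (idx + 1) idx true idx
    else if x = 1 ∧ flg = true then pvLoopA t (idx + 1) s true idx
    else if x = 0 ∧ flg = true then (s, e)
    else pvLoopA t (idx + 1) s flg e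

def get_avg_index_of_first_burst_of_ones (some_list : List Int) : Int :=
  let se := pvLoopA some_list 0 0 false 0
  se.1 + PySem.Int.floordiv (se.2 - se.1) 2

-- ===== PORT B =====
def get_avg_index_of_first_burst_of_ones_alt (some_list : List Int) : Int :=
  match PySem.List.index? some_list 1 with
  | none => 0                                     -- "if 1 not in some_list: return 0"
  | some start =>                                 -- start = some_list.index(1)
    let tail := PySem.List.slice some_list (some (start : Int)) none
    let stop : Nat :=
      match PySem.List.index? tail 0 with         -- "tail.index(0) if 0 in tail else len(tail)"
      | some i => i
      | none => tail.length
    let seg := PySem.List.slice tail none (some (stop : Int))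
    let rev := (PySem.List.slice? seg none none (-1)).getD []      -- seg[::-1]
    -- seg[::-1].index(1); 1 is always in seg (seg starts with the found 1), so getD 0 is a totality guard only
    let ridx : Nat := (PySem.List.index? rev 1).getD 0
    let last : Int := (seg.length : Int) - 1 - (ridx : Int)
    (start : Int) + PySem.Int.floordiv last 2

-- ===== PRECONDITION & SPEC =====
def Spec_get_avg_index_of_first_burst_of_ones (some_list : List Int) (out : Int) : Prop := out = get_avg_index_of_first_burst_of_ones_alt some_list
instance (some_list : List Int) (out : Int) : Decidable (Spec_get_avg_index_of_first_burst_of_ones some_list out) := by unfold Spec_get_avg_index_of_first_burst_of_ones; infer_instance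

-- ===== CLAIM (what is proved, stated in full; the proofs are below) =====
def Claim_equal_get_avg_index_of_first_burst_of_ones : Prop := ∀ (some_list : List Int), Dom_get_avg_index_of_first_burst_of_ones some_list → Spec_get_avg_index_of_first_burst_of_ones some_list (get_avg_index_of_first_burst_of_ones some_list)

-- ===== LEMMAS AND PROOFS =====

-- offset (1-based) of the last 1 before the first 0, 0 if there is none
def pvG : List Int → Int
  | [] => 0
  | x :: t => if x = 1 then 1 + pvG t else if x = 0 then 0 else if pvG t = 0 then 0 else 1 + pvG t

theorem pvG_nonneg (u : List Int) : 0 ≤ pvG u := by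
  induction u with
  | nil => simp [pvG]
  | cons x t ih => simp only [pvG]; split_ifs <;> omega

theorem pvG_append_one (w : List Int) (h : (0 : Int) ∉ w) : pvG (w ++ [1]) = (w.length : Int) + 1 := by
  induction w with
  | nil => simp [pvG]
  | cons x t ih =>
    simp only [List.mem_cons, not_or] at h
    have hx : x ≠ 0 := fun hc => h.1 hc.symm
    have ht := ih h.2
    have hpos : (t.length : Int) + 1 ≠ 0 := by omega
    by_cases h1 : x = 1
    · simp [pvG, h1, ht]; ring
    · simp [pvG, h1, hx, ht, hpos]; ring

theorem pvG_append_ne (w : List Int) (y : Int) (hy : y ≠ 1) : pvG (w ++ [y]) = pvG w := by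
  induction w with
  | nil => simp [pvG, hy]
  | cons x t ih => simp only [List.cons_append, pvG, ih]

theorem pvG_prefix (u rest : List Int) (h : (0 : Int) ∉ u) : pvG (u ++ 0 :: rest) = pvG u := by
  induction u with
  | nil => simp [pvG]
  | cons x t ih =>
    simp only [List.mem_cons, not_or] at h
    simp only [List.cons_append, pvG, ih h.2]

-- B's reversed search on a zero-free segment 1 :: u computes pvG u
theorem pvLast_eq_pvG (u : List Int) (h : (0 : Int) ∉ u) :
    (u.length : Int) - (((PySem.List.index? (u.reverse ++ [1]) 1).getD 0 : Nat) : Int) = pvG u := by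
  induction u using List.reverseRecOn with
  | nil => simp [pvG]
  | append_singleton w y ih =>
    simp only [List.mem_append, List.mem_singleton, not_or] at h
    by_cases hy : y = 1
    · subst hy
      rw [List.reverse_append, List.reverse_singleton, List.singleton_append, List.cons_append,
        PySem.List.index?_cons_self, pvG_append_one w h.1]
      simp
    · rw [pvG_append_ne w y hy, ← ih h.1]
      rw [List.reverse_append, List.reverse_singleton, List.singleton_append, List.cons_append,
        PySem.List.index?_cons_of_ne _ hy]
      by_cases h1 : (1 : Int) ∈ w.reverse ++ [1]
      · have hs : (PySem.List.index? (w.reverse ++ [1]) 1).isSome = true :=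
          (PySem.List.index?_isSome_iff _ _).mpr h1
        rcases Option.isSome_iff_exists.mp hs with ⟨r, hr⟩
        have hrlen : r ≤ (w.reverse ++ [1]).length := by
          rcases (PySem.List.index?_eq_some_iff _ _ _).mp hr with ⟨pre, suf, he, hl, _⟩
          subst hl; rw [he]; simp
        rw [hr]
        simp at hrlen ⊢
      · exact absurd (by simp) h1

-- A's phase-2 loop (flag already true) in closed form
theorem pvLoopA_phase2 (t : List Int) : ∀ (idx s e : Int),
    pvLoopA t idx s true e = (s, if pvG t = 0 then e else idx + pvG t - 1) := by
  induction t with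
  | nil => intro idx s e; simp [pvLoopA, pvG]
  | cons x t ih =>
    intro idx s e
    have hnn := pvG_nonneg t
    by_cases h1 : x = 1
    · subst h1
      simp only [pvLoopA, ih, pvG]
      norm_num
      split_ifs <;> simp_all <;> omega
    · by_cases h0 : x = 0
      · subst h0
        norm_num [pvLoopA, pvG]
      · simp only [pvLoopA, ih, pvG, if_neg h1, if_neg h0]
        norm_num [h1, h0]
        split_ifs <;> simp_all <;> omega

-- A's loop skips a 1-free prefix unchanged
theorem pvLoopA_skip (pre : List Int) (h : (1 : Int) ∉ pre) : ∀ (rest : List Int) (idx : Int),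
    pvLoopA (pre ++ rest) idx 0 false 0 = pvLoopA rest (idx + pre.length) 0 false 0 := by
  induction pre with
  | nil => intro rest idx; simp
  | cons x t ih =>
    intro rest idx
    simp only [List.mem_cons, not_or] at h
    have hx : x ≠ 1 := fun hc => h.1 hc.symm
    simp [pvLoopA, hx, ih h.2]
    congr 1
    ring

theorem pvLoopA_none (xs : List Int) (h : (1 : Int) ∉ xs) : ∀ idx : Int, pvLoopA xs idx 0 false 0 = (0, 0) := by
  induction xs with
  | nil => intro idx; rfl
  | cons x t ih =>
    intro idx
    simp only [List.mem_cons, not_or] at h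
    have hx : x ≠ 1 := fun hc => h.1 hc.symm
    simp [pvLoopA, hx, ih h.2]

-- value of A on pre ++ 1 :: suf, pre free of 1s
theorem pvA_val (pre suf : List Int) (h : (1 : Int) ∉ pre) :
    get_avg_index_of_first_burst_of_ones (pre ++ 1 :: suf)
      = (pre.length : Int) + PySem.Int.floordiv (pvG suf) 2 := by
  unfold get_avg_index_of_first_burst_of_ones
  rw [pvLoopA_skip pre h (1 :: suf) 0]
  have hstep : pvLoopA (1 :: suf) (0 + (pre.length : Int)) 0 false 0
      = pvLoopA suf (0 + (pre.length : Int) + 1) (0 + (pre.length : Int)) true (0 + (pre.length : Int)) := by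
    simp [pvLoopA]
  rw [hstep, pvLoopA_phase2]
  by_cases hz : pvG suf = 0
  · simp [hz]
  · simp only [if_neg hz]
    have h2 : 0 + (pre.length : Int) + 1 + pvG suf - 1 - (0 + (pre.length : Int)) = pvG suf := by ring
    simp only [h2]
    congr 1
    omega

-- value of B on pre ++ 1 :: suf, pre free of 1s
theorem pvB_val (pre suf : List Int) (h : (1 : Int) ∉ pre) :
    get_avg_index_of_first_burst_of_ones_alt (pre ++ 1 :: suf)
      = (pre.length : Int) + PySem.Int.floordiv (pvG suf) 2 := by
  have hfind : PySem.List.index? (pre ++ 1 :: suf) 1 = some pre.length :=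
    (PySem.List.index?_eq_some_iff _ _ _).mpr ⟨pre, suf, rfl, rfl, h⟩
  unfold get_avg_index_of_first_burst_of_ones_alt
  rw [hfind]
  have htail : PySem.List.slice (pre ++ 1 :: suf) (some ((pre.length : Nat) : Int)) none = 1 :: suf := by
    rw [PySem.List.slice_from_natCast, List.drop_left]
  simp only [htail]
  cases hz : PySem.List.index? (1 :: suf) 0 with
  | none =>
    have h0suf : (0 : Int) ∉ suf := by
      have := (PySem.List.index?_eq_none_iff (1 :: suf) 0).mp hz
      simp at this; exact this
    have hseg : PySem.List.slice (1 :: suf) none (some (((1 :: suf).length : Nat) : Int)) = 1 :: suf := by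
      rw [PySem.List.slice_to_natCast]; simp
    simp only [hseg, PySem.List.slice?_none_none_neg_one, Option.getD_some, List.reverse_cons]
    have hkey := pvLast_eq_pvG suf h0suf
    congr 1
    congr 1
    simp only [List.length_cons]
    push_cast
    omega
  | some i =>
    rw [PySem.List.index?_cons_of_ne _ (by norm_num : (1:Int) ≠ 0)] at hz
    cases hj : PySem.List.index? suf 0 with
    | none => rw [hj] at hz; simp at hz
    | some j =>
      rw [hj] at hz
      simp only [Option.map_some] at hz
      rcases (PySem.List.index?_eq_some_iff _ _ _).mp hj with ⟨u, rest, hsuf, hulen, hu0⟩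
      injection hz with hij
      have hseg : PySem.List.slice (1 :: suf) none (some ((i : Nat) : Int)) = 1 :: u := by
        rw [PySem.List.slice_to_natCast, ← hij, hsuf, List.take_succ_cons, ← hulen, List.take_left]
      simp only [hseg, PySem.List.slice?_none_none_neg_one, Option.getD_some, List.reverse_cons]
      have hkey := pvLast_eq_pvG u hu0
      have hGpref : pvG suf = pvG u := by rw [hsuf]; exact pvG_prefix u rest hu0
      rw [hGpref]
      congr 1
      congr 1
      simp only [List.length_cons]
      push_cast
      omega

-- ===== VERDICT (by name: the statement is the Claim_ definition above) =====
theorem get_avg_index_of_first_burst_of_ones_spec : Claim_equal_get_avg_index_of_first_burst_of_ones := by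
  intro xs _
  show _ = _
  cases hidx : PySem.List.index? xs 1 with
  | none =>
    have h1 : (1 : Int) ∉ xs := (PySem.List.index?_eq_none_iff _ _).mp hidx
    unfold get_avg_index_of_first_burst_of_ones get_avg_index_of_first_burst_of_ones_alt
    rw [hidx, pvLoopA_none xs h1 0]
    show ((0,0) : Int × Int).1 + PySem.Int.floordiv (((0,0) : Int × Int).2 - ((0,0) : Int × Int).1) 2 = 0
    decide
  | some k =>
    rcases (PySem.List.index?_eq_some_iff _ _ _).mp hidx with ⟨pre, suf, hxs, hlen, hpre⟩
    subst hxs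
    rw [pvA_val pre suf hpre, pvB_val pre suf hpre]
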